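-- pv_equiv track=rewrite | github.com/pypi-data/pypi-mirror-65 | packages/fastg2protlib/fastg2protlib-0.1.8.tar.gz/fastg2protlib-0.1.8/fastg2protlib/fastg2protlib.py | _expand_walk
-- ===== SOURCE A (Python) =====
-- def _expand_walk(walks):
--     # region
--     """
--
--     We expand existing depth-first traversals here.
--     A node with multiple predecessors has multiple full length traversals.
--     This function splices together existing walks where a node is traversed more than once.
--
--     Parameters
--     ----------
--     walks: list of DFS edge traversals
--
--     Returns
--     -------
--     expanded_walks: list of DFS edge traversals expanded with longer paths.
--     """
--     # endregion
--     expanded_walks = []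
--     walk_starts = {}
--     for i, walk in enumerate(walks):
--         walk_starts[walk[0]] = i
--
--     for walk in walks:
--         path = []
--         for i, node in enumerate(walk):
--             if node in walk_starts and i > 0:
--                 if node != walk[0]:
--                     p = path
--                     p.extend(walks[walk_starts[node]])
--                     expanded_walks.append(p)
--                     path = []
--             path.append(node)
--     return expanded_walks
-- ===== SOURCE B (Python) =====
-- def _expand_walk(walks):
--     # Same splice result computed per-walk from precomputed split indices.
--     walk_starts = {w[0]: i for i, w in enumerate(walks)}
--     out = []
--     for walk in walks:
--         splits = [i for i in range(1, len(walk))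
--                   if walk[i] in walk_starts and walk[i] != walk[0]]
--         prev = 0
--         for cur in splits:
--             out.append(walk[prev:cur] + list(walks[walk_starts[walk[cur]]]))
--             prev = cur
--     return out
-- ===== Notes on version B (the rewrite author's own statement) =====
-- stated objective: alternative
-- what changed: B replaces A's per-node accumulator loop (building 'path' element by element and resetting it at each splice) by first collecting each walk's split indices and then emitting each spliced walk as a slice walk[prev:cur] plus the referenced walk.
import Mathlib
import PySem

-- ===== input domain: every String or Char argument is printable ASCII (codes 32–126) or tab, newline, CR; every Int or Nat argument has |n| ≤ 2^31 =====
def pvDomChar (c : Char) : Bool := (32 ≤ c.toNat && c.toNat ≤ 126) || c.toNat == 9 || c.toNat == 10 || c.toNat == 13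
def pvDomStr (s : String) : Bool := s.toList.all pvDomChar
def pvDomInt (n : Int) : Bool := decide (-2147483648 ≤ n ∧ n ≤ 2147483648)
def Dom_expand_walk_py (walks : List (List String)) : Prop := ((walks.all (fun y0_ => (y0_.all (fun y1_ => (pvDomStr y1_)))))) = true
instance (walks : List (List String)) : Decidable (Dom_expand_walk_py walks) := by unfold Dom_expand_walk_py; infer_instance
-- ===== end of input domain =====

-- B recomputes each walk's splice points up front and emits the segments by
-- slicing, instead of A's per-node accumulator; same result, same asymptotic cost.

-- ===== PORT A =====
-- walk_starts = {} ; for i, walk in enumerate(walks): walk_starts[walk[0]] = i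
-- (walk[0] raises IndexError on an empty walk — excluded by Pre_; pyGetD gives "" there)
def pvStarts (walks : List (List String)) : PySem.Dict String Int :=
  (PySem.List.enumerate walks).foldl
    (fun d p => d.insert (PySem.List.pyGetD p.2 0 "") p.1) PySem.Dict.empty

-- walks[walk_starts[node]] (only evaluated under 'node in walk_starts', index always in range)
def pvRef (walks : List (List String)) (ws : PySem.Dict String Int) (node : String) : List String :=
  PySem.List.pyGetD walks (ws.getD node 0) []

-- body of A's inner 'for i, node in enumerate(walk)' loop; state = (expanded_walks, path)
def stepA (walks : List (List String)) (ws : PySem.Dict String Int) (walk : List String)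
    (st : List (List String) × List String) (en : Int × String) :
    List (List String) × List String :=
  if ws.contains en.2 && decide (0 < en.1) then
    if en.2 != PySem.List.pyGetD walk 0 "" then
      (st.1 ++ [st.2 ++ pvRef walks ws en.2], [en.2])
    else (st.1, st.2 ++ [en.2])
  else (st.1, st.2 ++ [en.2])

def expand_walk_py (walks : List (List String)) : List (List String) :=
  let ws := pvStarts walks
  walks.foldl (fun expanded walk =>
    ((PySem.List.enumerate walk).foldl (stepA walks ws walk) (expanded, [])).1) []

-- ===== PORT B =====
-- split-index predicate: walk[i] in walk_starts and walk[i] != walk[0]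
def pvSplit (ws : PySem.Dict String Int) (walk : List String) (i : Int) : Bool :=
  ws.contains (PySem.List.pyGetD walk i "") &&
    (PySem.List.pyGetD walk i "" != PySem.List.pyGetD walk 0 "")

-- body of B's 'for cur in splits' loop; state = (out, prev)
def stepB (walks : List (List String)) (ws : PySem.Dict String Int) (walk : List String)
    (st : List (List String) × Int) (cur : Int) : List (List String) × Int :=
  (st.1 ++ [PySem.List.slice walk (some st.2) (some cur) ++
            pvRef walks ws (PySem.List.pyGetD walk cur "")], cur)

def expand_walk_py_alt (walks : List (List String)) : List (List String) :=
  let ws := pvStarts walks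
  walks.foldl (fun out walk =>
    let splits := (PySem.List.pyRange 1 (walk.length : Int) 1).filter (pvSplit ws walk)
    (splits.foldl (stepB walks ws walk) (out, 0)).1) []

-- ===== PRECONDITION & SPEC =====
-- Pre_ excludes exactly the inputs where Python A raises (IndexError on walk[0] of an empty walk; B raises there too)
def Pre_expand_walk_py (walks : List (List String)) : Prop := ∀ w ∈ walks, w ≠ []
instance (walks : List (List String)) : Decidable (Pre_expand_walk_py walks) := by
  unfold Pre_expand_walk_py; infer_instance
def pvWitness_expand_walk_py : List (List String) := [["a", "b"], ["b", "c"]]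

def Spec_expand_walk_py (walks : List (List String)) (out : List (List String)) : Prop := out = expand_walk_py_alt walks
instance (walks : List (List String)) (out : List (List String)) : Decidable (Spec_expand_walk_py walks out) := by unfold Spec_expand_walk_py; infer_instance

-- ===== CLAIM (what is proved, stated in full; the proofs are below) =====
def Claim_equal_expand_walk_py : Prop := ∀ (walks : List (List String)), Dom_expand_walk_py walks → Pre_expand_walk_py walks → Spec_expand_walk_py walks (expand_walk_py walks)

-- ===== LEMMAS AND PROOFS =====

-- A's loop body, rephrased by the split predicate (0 < i, walk[i] = node)
lemma stepA_eq (walks : List (List String)) (ws : PySem.Dict String Int) (walk : List String)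
    (st : List (List String) × List String) (i : Int) (node : String)
    (hi : 0 < i) (hn : PySem.List.pyGetD walk i "" = node) :
    stepA walks ws walk st (i, node)
      = if pvSplit ws walk i then (st.1 ++ [st.2 ++ pvRef walks ws node], [node])
        else (st.1, st.2 ++ [node]) := by
  unfold stepA pvSplit
  rw [hn]
  by_cases h1 : ws.contains node
  · by_cases h2 : node = PySem.List.pyGetD walk 0 ""
    · simp [h2, hi]
    · simp [h1, h2, hi]
  · simp [h1, hi]

-- invariant: A's running 'path' is always the slice walk[prev:j] of the walk processed so far
lemma inner_lemma (walks : List (List String)) (ws : PySem.Dict String Int) (walk : List String) :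
    ∀ (suffix : List String) (j prev : Nat) (out : List (List String)),
      1 ≤ j → prev ≤ j → walk.drop j = suffix →
      (List.foldl (stepA walks ws walk) (out, (walk.drop prev).take (j - prev))
          (PySem.List.enumerate suffix (j : Int))).1
        = (List.foldl (stepB walks ws walk) (out, (prev : Int))
            ((PySem.List.pyRange (j : Int) (walk.length : Int) 1).filter (pvSplit ws walk))).1 := by
  intro suffix
  induction suffix with
  | nil =>
    intro j prev out hj hpj hdrop
    have hlen : walk.length ≤ j := by
      have := congrArg List.length hdrop; simp at this; omega
    rw [PySem.List.pyRange_one_eq_nil (by exact_mod_cast hlen)]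
    simp [PySem.List.enumerate]
  | cons node rest ih =>
    intro j prev out hj hpj hdrop
    have hjlen : j < walk.length := by
      have := congrArg List.length hdrop; simp at this; omega
    have hnode : walk[j]? = some node := by
      have h0 : (walk.drop j)[0]? = some node := by rw [hdrop]; rfl
      rw [List.getElem?_drop] at h0; simpa using h0
    have hgetD : PySem.List.pyGetD walk (j : Int) "" = node := by
      rw [PySem.List.pyGetD_natCast]
      simp [List.getD, hnode]
    have hdrop1 : walk.drop (j + 1) = rest := by
      have h1 : (walk.drop j).drop 1 = rest := by rw [hdrop]; rfl
      rw [List.drop_drop] at h1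
      exact h1
    rw [PySem.List.enumerate_cons, PySem.List.pyRange_one_cons (by exact_mod_cast hjlen)]
    rw [List.foldl_cons, List.filter_cons,
        stepA_eq walks ws walk _ (j : Int) node (by exact_mod_cast hj) hgetD]
    by_cases hc : pvSplit ws walk (j : Int) = true
    · rw [if_pos hc, hc, if_pos rfl, List.foldl_cons]
      dsimp only
      have hstepB : stepB walks ws walk (out, (prev : Int)) (j : Int)
          = (out ++ [(walk.drop prev).take (j - prev) ++ pvRef walks ws node], (j : Int)) := by
        unfold stepB
        rw [PySem.List.slice_natCast, hgetD]
      rw [hstepB]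
      have hpath1 : (walk.drop j).take ((j + 1) - j) = [node] := by
        rw [hdrop]; simp
      have := ih (j + 1) j (out ++ [(walk.drop prev).take (j - prev) ++ pvRef walks ws node])
        (by omega) (by omega) hdrop1
      rw [hpath1] at this
      push_cast at this ⊢
      exact this
    · rw [if_neg hc, if_neg hc]
      dsimp only
      have hpath : (walk.drop prev).take (j - prev) ++ [node] = (walk.drop prev).take ((j + 1) - prev) := by
        have hidx : (walk.drop prev)[j - prev]? = some node := by
          rw [List.getElem?_drop]
          have : prev + (j - prev) = j := by omega
          rw [this, hnode]
        have hsub : (j + 1) - prev = (j - prev) + 1 := by omega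
        rw [hsub, List.take_add_one, hidx]
        rfl
      rw [hpath]
      have := ih (j + 1) prev out (by omega) (by omega) hdrop1
      push_cast at this ⊢
      exact this

lemma per_walk (walks : List (List String)) (ws : PySem.Dict String Int)
    (walk : List String) (out : List (List String)) :
    ((PySem.List.enumerate walk).foldl (stepA walks ws walk) (out, [])).1
      = (((PySem.List.pyRange 1 (walk.length : Int) 1).filter (pvSplit ws walk)).foldl
          (stepB walks ws walk) (out, 0)).1 := by
  cases walk with
  | nil =>
    rw [PySem.List.pyRange_one_eq_nil (by simp)]
    simp [PySem.List.enumerate]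
  | cons node rest =>
    rw [PySem.List.enumerate_cons, List.foldl_cons]
    have h0 : stepA walks ws (node :: rest) (out, []) (0, node) = (out, [node]) := by
      unfold stepA; simp
    rw [h0]
    have := inner_lemma walks ws (node :: rest) rest 1 0 out (by omega) (by omega) (by rfl)
    simpa using this

-- ===== VERDICT (by name: the statement is the Claim_ definition above) =====
theorem expand_walk_py_spec : Claim_equal_expand_walk_py := by
  intro walks _ _
  unfold Spec_expand_walk_py expand_walk_py expand_walk_py_alt
  exact PySem.List.foldl_congr_mem walks _ _ []
    (fun out walk _ => per_walk walks (pvStarts walks) walk out)
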